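-- pv_equiv track=rewrite | github.com/Moody-code365/Telegram-PCBuilderBot | Bot/services/pc_builder.py | degrade_to_budget
-- ===== SOURCE A (Python) =====
-- from typing import Dict, Any, List, Optional, Tuple
--
-- def degrade_to_budget(build: Dict[str,Dict[str,Any]], components: Dict[str,List[Dict[str,Any]]], target_budget: int) -> Tuple[Dict[str,Dict[str,Any]], int]:
--     """
--     Попытка понизить наиболее дорогостоящие элементы, минимально влияя на perf.
--     Простая стратегия: пробуем по очереди уменьшать GPU->CPU->RAM->SSD->Motherboard->PSU->Case->Cooler
--     """
--     order = ["gpu","cpu","ram","ssd","motherboard","psu","case","coolers"]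
--     def total(b):
--         return sum(int(v.get("price",0)) for v in b.values() if isinstance(v, dict))
--     cur = total(build)
--     if cur <= target_budget:
--         return build, cur
--     changed = True
--     while cur > target_budget and changed:
--         changed = False
--         for part in order:
--             cur_item = build.get(part)
--             if not isinstance(cur_item, dict): continue
--             cur_price = int(cur_item.get("price",0))
--             candidates = components.get(part) or []
--             cheaper = [c for c in candidates if c.get("price",0) < cur_price]
--             if not cheaper: continue
--             # choose the most expensive among cheaper (best trade-off)
--             candidate = sorted(cheaper, key=lambda x: x["price"], reverse=True)[0]
--             build[part] = candidate
--             cur = total(build)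
--             changed = True
--             if cur <= target_budget:
--                 break
--     return build, cur
-- ===== SOURCE B (Python) =====
-- def degrade_to_budget(build, components, target_budget):
--     # Different algorithm: pre-sort every part's candidate list once (descending by
--     # price, stable) and walk a per-part pointer to the next strictly-cheaper pick,
--     # maintaining the running total incrementally. Correct because "most expensive
--     # candidate strictly cheaper than the current price" is exactly the first entry
--     # after the pointer in the presorted chain (stable sort commutes with the
--     # price-threshold filter), so every pick equals A's per-step filter+sort pick.
--     order = ["gpu", "cpu", "ram", "ssd", "motherboard", "psu", "case", "coolers"]
--     cur = sum(int(v.get("price", 0)) for v in build.values() if isinstance(v, dict))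
--     if cur <= target_budget:
--         return build, cur
--     chains = {part: sorted(components.get(part) or [],
--                            key=lambda c: c.get("price", 0), reverse=True)
--               for part in order}
--     ptr = {part: 0 for part in order}
--     while cur > target_budget:
--         changed = False
--         for part in order:
--             item = build.get(part)
--             if not isinstance(item, dict):
--                 continue
--             p = int(item.get("price", 0))
--             chain = chains[part]
--             i = ptr[part]
--             while i < len(chain) and chain[i].get("price", 0) >= p:
--                 i += 1
--             ptr[part] = i
--             if i == len(chain):
--                 continue
--             cand = chain[i]
--             build[part] = cand
--             cur += int(cand.get("price", 0)) - p
--             changed = True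
--             if cur <= target_budget:
--                 break
--         if not changed:
--             break
--     return build, cur
-- ===== Notes on version B (the rewrite author's own statement) =====
-- stated objective: alternative
-- what changed: Instead of re-filtering and re-sorting the cheaper candidates at every downgrade step, B pre-sorts each part's whole candidate list once (descending by price, stable) and keeps a per-part pointer that only moves forward to the next strictly-cheaper entry, maintaining the running total incrementally; each step's pick equals A's because the stable sort commutes with the price-threshold filter.
-- outside the precondition, e.g. on degrade_to_budget({'gpu': {'price': 5}}, {'gpu': [{}]}, 3): A raises KeyError, B returns ({'gpu': {}}, 0)
import Mathlib
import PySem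

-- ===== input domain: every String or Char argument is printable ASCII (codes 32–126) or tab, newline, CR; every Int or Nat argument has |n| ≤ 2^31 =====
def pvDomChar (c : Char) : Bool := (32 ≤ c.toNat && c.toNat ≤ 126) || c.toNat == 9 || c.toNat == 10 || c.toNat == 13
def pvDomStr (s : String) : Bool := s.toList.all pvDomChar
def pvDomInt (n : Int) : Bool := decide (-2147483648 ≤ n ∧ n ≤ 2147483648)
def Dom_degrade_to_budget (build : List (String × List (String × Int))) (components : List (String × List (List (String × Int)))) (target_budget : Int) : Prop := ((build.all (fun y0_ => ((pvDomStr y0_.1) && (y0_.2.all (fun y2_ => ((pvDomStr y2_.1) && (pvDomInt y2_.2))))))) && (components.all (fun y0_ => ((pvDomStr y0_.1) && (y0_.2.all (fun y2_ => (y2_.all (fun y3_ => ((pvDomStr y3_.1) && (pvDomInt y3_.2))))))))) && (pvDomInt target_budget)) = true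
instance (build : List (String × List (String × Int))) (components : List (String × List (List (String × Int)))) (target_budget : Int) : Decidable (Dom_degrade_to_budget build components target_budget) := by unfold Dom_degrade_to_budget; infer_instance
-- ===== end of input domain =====

-- B replaces A's per-step "filter the cheaper candidates and sort them" pick by a different
-- algorithm: every part's candidate list is pre-sorted ONCE (descending by price, stable) and a
-- per-part pointer advances to the next strictly-cheaper entry, with the running total maintained
-- incrementally (objective: alternative). Both A and B mutate `build` in place in Python (the
-- same mutation); the equivalence proved here is about the returned value.

-- ===== PORT A =====
-- int(v.get("price", 0)) for an inner dict (identical code in both Pythons)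
def pvPrice (d : List (String × Int)) : Int := PySem.Dict.getD (PySem.Dict.mk d) "price" 0

-- total(b): sum of the values' prices (in the typed domain every value is a dict)
def pvTotal (b : PySem.Dict String (List (String × Int))) : Int :=
  (b.items.map (fun kv => pvPrice kv.2)).sum

def pvOrder : List String := ["gpu", "cpu", "ram", "ssd", "motherboard", "psu", "case", "coolers"]

-- termination measure for both while-loops: how many strictly cheaper candidates remain
def pvMeasure (comps : PySem.Dict String (List (List (String × Int))))
    (b : PySem.Dict String (List (String × Int))) : Nat :=
  (pvOrder.map (fun part =>
    match b.get? part with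
    | none => 0
    | some item => ((comps.getD part []).filter (fun c => decide (pvPrice c < pvPrice item))).length)).sum

-- one pass of A's `for part in order` loop; returns (build, cur, changed)
def pvRoundA (comps : PySem.Dict String (List (List (String × Int)))) (target : Int) :
    List String → PySem.Dict String (List (String × Int)) → Int → Bool →
    PySem.Dict String (List (String × Int)) × Int × Bool
  | [], b, cur, ch => (b, cur, ch)
  | part :: rest, b, cur, ch =>
    match b.get? part with
    | none => pvRoundA comps target rest b cur ch
    | some item =>
      let p := pvPrice item
      let cheaper := (comps.getD part []).filter (fun c => decide (pvPrice c < p))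
      if cheaper = [] then pvRoundA comps target rest b cur ch
      else
        -- sorted(cheaper, key=lambda x: x["price"], reverse=True)[0]; under Pre_ every
        -- candidate carries a "price" key, so the key equals pvPrice, and [0] of the
        -- nonempty sorted list is headI
        let cand := (PySem.List.sorted cheaper pvPrice true).headI
        let b' := b.insert part cand
        let cur' := pvTotal b'
        if cur' ≤ target then (b', cur', true)
        else pvRoundA comps target rest b' cur' true

-- A's `while cur > target_budget and changed` loop (entered with changed = True), encoded with
-- fuel: pvMeasure strictly decreases on every changed round, so pvMeasure + 1 rounds always suffice
-- and the fuel-exhausted branch is never taken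
def pvLoopA (comps : PySem.Dict String (List (List (String × Int)))) (target : Int) :
    Nat → PySem.Dict String (List (String × Int)) → Int →
    PySem.Dict String (List (String × Int)) × Int
  | 0, b, cur => (b, cur)
  | fuel + 1, b, cur =>
    let r := pvRoundA comps target pvOrder b cur false
    if r.2.2 = true ∧ target < r.2.1 then pvLoopA comps target fuel r.1 r.2.1
    else (r.1, r.2.1)

def degrade_to_budget (build : List (String × List (String × Int))) (components : List (String × List (List (String × Int)))) (target_budget : Int) : (List (String × List (String × Int))) × Int :=
  let b := PySem.Dict.mk build
  let cur := pvTotal b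
  if cur ≤ target_budget then (build, cur)
  else
    let comps := PySem.Dict.mk components
    let r := pvLoopA comps target_budget (pvMeasure comps b + 1) b cur
    (r.1.items, r.2)

-- ===== PORT B =====
-- chains = {part: sorted(components.get(part) or [], key=..., reverse=True) for part in order}
-- (sorted() of Source B ported as the PySem stable sort)
def pvChains (comps : PySem.Dict String (List (List (String × Int)))) :
    PySem.Dict String (List (List (String × Int))) :=
  PySem.Dict.mk (pvOrder.map (fun part => (part, PySem.List.sorted (comps.getD part []) pvPrice true)))

-- ptr = {part: 0 for part in order}
def pvPtr0 : PySem.Dict String Nat := PySem.Dict.mk (pvOrder.map (fun part => (part, 0)))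

-- the inner `while i < len(chain) and chain[i].get("price", 0) >= p: i += 1`
def pvSkip (chain : List (List (String × Int))) (p : Int) (i : Nat) : Nat :=
  if h : i < chain.length then
    if p ≤ pvPrice chain[i] then pvSkip chain p (i + 1) else i
  else i
termination_by chain.length - i
decreasing_by exact Nat.sub_succ_lt_self _ _ h

-- one pass of B's `for part in order` loop; returns (build, cur, ptr, changed)
def pvRoundB (chains : PySem.Dict String (List (List (String × Int)))) (target : Int) :
    List String → PySem.Dict String (List (String × Int)) → Int → PySem.Dict String Nat → Bool →
    PySem.Dict String (List (String × Int)) × Int × PySem.Dict String Nat × Bool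
  | [], b, cur, ptr, ch => (b, cur, ptr, ch)
  | part :: rest, b, cur, ptr, ch =>
    match b.get? part with
    | none => pvRoundB chains target rest b cur ptr ch
    | some item =>
      let p := pvPrice item
      let chain := chains.getD part []
      let i := pvSkip chain p (ptr.getD part 0)
      let ptr' := ptr.insert part i
      if h : i < chain.length then
        let cand := chain[i]
        let b' := b.insert part cand
        let cur' := cur + pvPrice cand - p
        if cur' ≤ target then (b', cur', ptr', true)
        else pvRoundB chains target rest b' cur' ptr' true
      else pvRoundB chains target rest b cur ptr' ch

-- B's `while cur > target_budget` loop with the `if not changed: break` exit, encoded with the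
-- same fuel bound as A's loop (every changed round strictly shrinks pvMeasure)
def pvLoopB (chains : PySem.Dict String (List (List (String × Int)))) (target : Int) :
    Nat → PySem.Dict String (List (String × Int)) → Int → PySem.Dict String Nat →
    PySem.Dict String (List (String × Int)) × Int
  | 0, b, cur, _ => (b, cur)
  | fuel + 1, b, cur, ptr =>
    if cur ≤ target then (b, cur)
    else
      let r := pvRoundB chains target pvOrder b cur ptr false
      if r.2.2.2 = true then pvLoopB chains target fuel r.1 r.2.1 r.2.2.1
      else (r.1, r.2.1)

def degrade_to_budget_alt (build : List (String × List (String × Int))) (components : List (String × List (List (String × Int)))) (target_budget : Int) : (List (String × List (String × Int))) × Int :=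
  let b := PySem.Dict.mk build
  let cur := pvTotal b
  if cur ≤ target_budget then (build, cur)
  else
    let chains := pvChains (PySem.Dict.mk components)
    let r := pvLoopB chains target_budget (pvMeasure chains b + 1) b cur pvPtr0
    (r.1.items, r.2)

-- ===== PRECONDITION & SPEC =====
-- Pre_ excludes (a) association lists with duplicate keys at any level, on which the Python
-- dict collapses duplicates and the list representation is ambiguous, and (b) inputs on which
-- a "price"-less component candidate could reach A's sort key x["price"] and raise KeyError
-- (conservatively: unless the budget is already met, every ordered part present in the build
-- with a positive price must only have candidates carrying a "price" key).
def Pre_degrade_to_budget (build : List (String × List (String × Int))) (components : List (String × List (List (String × Int)))) (target_budget : Int) : Prop :=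
  (build.map Prod.fst).Nodup ∧ (components.map Prod.fst).Nodup ∧
  (∀ kv ∈ build, (kv.2.map Prod.fst).Nodup) ∧
  (∀ kc ∈ components, ∀ c ∈ kc.2, (c.map Prod.fst).Nodup) ∧
  ((build.map (fun kv => PySem.Dict.getD (PySem.Dict.mk kv.2) "price" 0)).sum ≤ target_budget ∨
    ∀ kc ∈ components, (∀ c ∈ kc.2, "price" ∈ c.map Prod.fst) ∨
      kc.1 ∉ (["gpu", "cpu", "ram", "ssd", "motherboard", "psu", "case", "coolers"] : List String) ∨
      kc.1 ∉ build.map Prod.fst ∨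
      (∀ kv ∈ build, kv.1 = kc.1 → PySem.Dict.getD (PySem.Dict.mk kv.2) "price" 0 ≤ 0))
instance (build : List (String × List (String × Int))) (components : List (String × List (List (String × Int)))) (target_budget : Int) : Decidable (Pre_degrade_to_budget build components target_budget) := by unfold Pre_degrade_to_budget; infer_instance

def pvWitness_degrade_to_budget : (List (String × List (String × Int))) × (List (String × List (List (String × Int)))) × Int :=
  ([("gpu", [("price", 100)])], [("gpu", [[("price", 50)], [("price", 80)]])], 60)

def Spec_degrade_to_budget (build : List (String × List (String × Int))) (components : List (String × List (List (String × Int)))) (target_budget : Int) (out : (List (String × List (String × Int))) × Int) : Prop := out = degrade_to_budget_alt build components target_budget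
instance (build : List (String × List (String × Int))) (components : List (String × List (List (String × Int)))) (target_budget : Int) (out : (List (String × List (String × Int))) × Int) : Decidable (Spec_degrade_to_budget build components target_budget out) := by unfold Spec_degrade_to_budget; infer_instance

-- ===== CLAIM (what is proved, stated in full; the proofs are below) =====
def Claim_equal_degrade_to_budget : Prop := ∀ (build : List (String × List (String × Int))) (components : List (String × List (List (String × Int)))) (target_budget : Int), Dom_degrade_to_budget build components target_budget → Pre_degrade_to_budget build components target_budget → Spec_degrade_to_budget build components target_budget (degrade_to_budget build components target_budget)

-- ===== LEMMAS AND PROOFS =====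

-- fuel-sufficiency lemmas: every changed round strictly shrinks the measure
theorem pv_sum_map_lt {α : Type} (l : List α) (f g : α → Nat)
    (hle : ∀ x ∈ l, g x ≤ f x) (x0 : α) (hx : x0 ∈ l) (hlt : g x0 < f x0) :
    (l.map g).sum < (l.map f).sum := by
  induction l with
  | nil => simp at hx
  | cons a t ih =>
    have ha := hle a (List.mem_cons_self ..)
    simp only [List.map_cons, List.sum_cons]
    rcases List.mem_cons.1 hx with rfl | hx
    · have ht : (t.map g).sum ≤ (t.map f).sum :=
        List.sum_le_sum (by simpa using fun x hx => hle x (List.mem_cons_of_mem _ hx))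
      omega
    · have := ih (fun x hx => hle x (List.mem_cons_of_mem _ hx)) hx
      omega

theorem pv_filter_len_lt {α : Type} (l : List α) (f : α → Int) (x : α)
    (hx : x ∈ l) (b : Int) (hxb : f x < b) :
    (l.filter (fun c => decide (f c < f x))).length
      < (l.filter (fun c => decide (f c < b))).length := by
  induction l with
  | nil => simp at hx
  | cons a t ih =>
    rcases List.mem_cons.1 hx with rfl | hx
    · have ht : (t.filter (fun c => decide (f c < f x))).length
          ≤ (t.filter (fun c => decide (f c < b))).length := by
        apply List.Sublist.length_le
        apply List.monotone_filter_right
        intro c hc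
        simp only [decide_eq_true_eq] at *
        omega
      simp only [List.filter_cons]
      simp only [decide_eq_true_eq]
      rw [if_neg (by omega), if_pos hxb]
      simpa using Nat.lt_succ_of_le ht
    · have := ih hx
      simp only [List.filter_cons, decide_eq_true_eq]
      split_ifs with h1 h2 <;> first
        | (simp only [List.length_cons]; omega)
        | omega

theorem pv_measure_insert_lt (comps : PySem.Dict String (List (List (String × Int))))
    (b : PySem.Dict String (List (String × Int))) (part : String)
    (item cand : List (String × Int)) (hpart : part ∈ pvOrder)
    (hget : b.get? part = some item) (hcand : cand ∈ comps.getD part [])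
    (hlt : pvPrice cand < pvPrice item) :
    pvMeasure comps (b.insert part cand) < pvMeasure comps b := by
  unfold pvMeasure
  refine pv_sum_map_lt pvOrder _ _ ?_ part hpart ?_
  · intro q hq
    by_cases hq' : q = part
    · subst hq'
      rw [PySem.Dict.get?_insert_self, hget]
      exact le_of_lt (pv_filter_len_lt _ pvPrice cand hcand _ hlt)
    · rw [PySem.Dict.get?_insert_of_ne _ _ hq']
  · rw [PySem.Dict.get?_insert_self, hget]
    exact pv_filter_len_lt _ pvPrice cand hcand _ hlt

theorem pv_headI_mem {α : Type} [Inhabited α] (l : List α) (h : l ≠ []) : l.headI ∈ l := by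
  cases l with
  | nil => simp at h
  | cons a t => simp [List.headI]

theorem pv_roundA_measure (comps : PySem.Dict String (List (List (String × Int)))) (target : Int) :
    ∀ (parts : List String), (∀ x ∈ parts, x ∈ pvOrder) →
    ∀ (b : PySem.Dict String (List (String × Int))) (cur : Int) (ch : Bool),
      pvMeasure comps (pvRoundA comps target parts b cur ch).1 ≤ pvMeasure comps b ∧
      ((pvRoundA comps target parts b cur ch).2.2 = true →
        ch = true ∨ pvMeasure comps (pvRoundA comps target parts b cur ch).1 < pvMeasure comps b) := by
  intro parts
  induction parts with
  | nil => intro _ b cur ch; simp [pvRoundA]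
  | cons part rest ih =>
    intro hsub b cur ch
    have hrest : ∀ x ∈ rest, x ∈ pvOrder := fun x hx => hsub x (List.mem_cons_of_mem _ hx)
    have hpart : part ∈ pvOrder := hsub part (List.mem_cons_self ..)
    simp only [pvRoundA]
    cases hb : b.get? part with
    | none => exact ih hrest b cur ch
    | some item =>
      simp only
      by_cases hch : ((comps.getD part []).filter (fun c => decide (pvPrice c < pvPrice item))) = []
      · rw [if_pos hch]; exact ih hrest b cur ch
      · rw [if_neg hch]
        have hne : PySem.List.sorted ((comps.getD part []).filter (fun c => decide (pvPrice c < pvPrice item))) pvPrice true ≠ [] := by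
          rwa [Ne, PySem.List.sorted_eq_nil_iff]
        have hmem := pv_headI_mem _ hne
        rw [PySem.List.mem_sorted] at hmem
        have hc := List.mem_filter.1 hmem
        have hltc : pvPrice ((PySem.List.sorted ((comps.getD part []).filter (fun c => decide (pvPrice c < pvPrice item))) pvPrice true).headI) < pvPrice item :=
          of_decide_eq_true hc.2
        have hdec := pv_measure_insert_lt comps b part item _ hpart hb hc.1 hltc
        by_cases hle : pvTotal (b.insert part ((PySem.List.sorted ((comps.getD part []).filter (fun c => decide (pvPrice c < pvPrice item))) pvPrice true).headI)) ≤ target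
        · rw [if_pos hle]
          exact ⟨le_of_lt hdec, fun _ => Or.inr hdec⟩
        · rw [if_neg hle]
          obtain ⟨h1, h2⟩ := ih hrest (b.insert part _) _ true
          exact ⟨le_trans h1 (le_of_lt hdec), fun _ => Or.inr (lt_of_le_of_lt h1 hdec)⟩

theorem pvSkip_stop (chain : List (List (String × Int))) (p : Int) :
    ∀ i, pvSkip chain p i < chain.length → pvPrice (chain.getD (pvSkip chain p i) []) < p := by
  intro i
  fun_induction pvSkip chain p i with
  | case1 i h hle ih => exact ih
  | case2 i h hle =>
    intro _
    rw [List.getD_eq_getElem _ _ h]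
    omega
  | case3 i h => intro hc; omega

theorem pv_roundB_measure (chains : PySem.Dict String (List (List (String × Int)))) (target : Int) :
    ∀ (parts : List String), (∀ x ∈ parts, x ∈ pvOrder) →
    ∀ (b : PySem.Dict String (List (String × Int))) (cur : Int) (ptr : PySem.Dict String Nat) (ch : Bool),
      pvMeasure chains (pvRoundB chains target parts b cur ptr ch).1 ≤ pvMeasure chains b ∧
      ((pvRoundB chains target parts b cur ptr ch).2.2.2 = true →
        ch = true ∨ pvMeasure chains (pvRoundB chains target parts b cur ptr ch).1 < pvMeasure chains b) := by
  intro parts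
  induction parts with
  | nil => intro _ b cur ptr ch; simp [pvRoundB]
  | cons part rest ih =>
    intro hsub b cur ptr ch
    have hrest : ∀ x ∈ rest, x ∈ pvOrder := fun x hx => hsub x (List.mem_cons_of_mem _ hx)
    have hpart : part ∈ pvOrder := hsub part (List.mem_cons_self ..)
    simp only [pvRoundB]
    cases hb : b.get? part with
    | none => exact ih hrest b cur ptr ch
    | some item =>
      simp only
      by_cases h : pvSkip (chains.getD part []) (pvPrice item) (ptr.getD part 0) < (chains.getD part []).length
      · rw [dif_pos h]
        have hlt : pvPrice ((chains.getD part [])[pvSkip (chains.getD part []) (pvPrice item) (ptr.getD part 0)]) < pvPrice item := by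
          have := pvSkip_stop (chains.getD part []) (pvPrice item) (ptr.getD part 0) h
          rwa [List.getD_eq_getElem _ _ h] at this
        have hdec := pv_measure_insert_lt chains b part item _ hpart hb (List.getElem_mem h) hlt
        by_cases hle : cur + pvPrice ((chains.getD part [])[pvSkip (chains.getD part []) (pvPrice item) (ptr.getD part 0)]) - pvPrice item ≤ target
        · rw [if_pos hle]
          exact ⟨le_of_lt hdec, fun _ => Or.inr hdec⟩
        · rw [if_neg hle]
          obtain ⟨h1, h2⟩ := ih hrest (b.insert part _) _ (ptr.insert part _) true
          exact ⟨le_trans h1 (le_of_lt hdec), fun _ => Or.inr (lt_of_le_of_lt h1 hdec)⟩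
      · rw [dif_neg h]
        exact ih hrest b cur (ptr.insert part _) ch


-- the stable reverse sort commutes with a price-threshold filter: step lemma on insertBy
theorem pv_insertBy_filter {α : Type} (key : α → Int) (p : Int) (x : α) (l : List α) :
    (PySem.List.insertBy (fun a b => decide (key b < key a)) x l).filter (fun c => decide (key c < p))
      = if key x < p then
          PySem.List.insertBy (fun a b => decide (key b < key a)) x (l.filter (fun c => decide (key c < p)))
        else l.filter (fun c => decide (key c < p)) := by
  induction l with
  | nil => by_cases hx : key x < p <;> simp [PySem.List.insertBy, hx]
  | cons y ys ih =>
    by_cases hxy : key y < key x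
    · by_cases hx : key x < p
      · have hy : key y < p := lt_trans hxy hx
        simp [PySem.List.insertBy, hxy, hx, hy]
      · simp [PySem.List.insertBy, hxy, hx]
    · by_cases hy : key y < p
      · by_cases hx : key x < p
        · simp [PySem.List.insertBy, hxy, hx, hy, ih]
        · simp [PySem.List.insertBy, hxy, hx, hy, ih]
      · by_cases hx : key x < p
        · simp [PySem.List.insertBy, hxy, hx, hy, ih]
        · simp [PySem.List.insertBy, hxy, hx, hy, ih]

theorem pv_foldl_insertBy_filter {α : Type} (key : α → Int) (p : Int) :
    ∀ (xs acc : List α),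
      (xs.foldl (fun acc x => PySem.List.insertBy (fun a b => decide (key b < key a)) x acc) acc).filter
          (fun c => decide (key c < p))
        = (xs.filter (fun c => decide (key c < p))).foldl
            (fun acc x => PySem.List.insertBy (fun a b => decide (key b < key a)) x acc)
            (acc.filter (fun c => decide (key c < p))) := by
  intro xs
  induction xs with
  | nil => intro acc; rfl
  | cons x t ih =>
    intro acc
    by_cases hx : key x < p
    · simp only [List.foldl_cons, List.filter_cons, hx, decide_true, if_pos]
      rw [ih, pv_insertBy_filter, if_pos hx]
    · simp only [List.foldl_cons, List.filter_cons, hx, decide_false, Bool.false_eq_true, if_false]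
      rw [ih, pv_insertBy_filter, if_neg hx]

theorem pv_sorted_filter_comm {α : Type} (key : α → Int) (p : Int) (xs : List α) :
    (PySem.List.sorted xs key true).filter (fun c => decide (key c < p))
      = PySem.List.sorted (xs.filter (fun c => decide (key c < p))) key true := by
  rw [PySem.List.sorted_rev_eq_foldl_insertBy, PySem.List.sorted_rev_eq_foldl_insertBy]
  simpa using pv_foldl_insertBy_filter key p xs []

-- the skip pointer never passes the end of the chain
theorem pvSkip_le_length (chain : List (List (String × Int))) (p : Int) :
    ∀ i, i ≤ chain.length → pvSkip chain p i ≤ chain.length := by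
  intro i
  fun_induction pvSkip chain p i with
  | case1 i h hle ih => intro _; exact ih (by omega)
  | case2 i h hle => intro hi; exact hi
  | case3 i h => intro hi; exact hi

-- everything strictly before the stopped pointer has price ≥ p
theorem pvSkip_prefix (chain : List (List (String × Int))) (p : Int) :
    ∀ i, ∀ j, i ≤ j → j < pvSkip chain p i → p ≤ pvPrice (chain.getD j []) := by
  intro i
  fun_induction pvSkip chain p i with
  | case1 i h hle ih =>
    intro j hij hj
    rcases Nat.eq_or_lt_of_le hij with rfl | hij'
    · rwa [List.getD_eq_getElem _ _ h]
    · exact ih j hij' hj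
  | case2 i h hle => intro j hij hj; omega
  | case3 i h => intro j hij hj; omega

-- descending chains: entries are nonincreasing in price
theorem pv_chain_getD_mono (xs : List (List (String × Int))) (i j : Nat)
    (hij : i ≤ j) (hj : j < (PySem.List.sorted xs pvPrice true).length) :
    pvPrice ((PySem.List.sorted xs pvPrice true).getD j [])
      ≤ pvPrice ((PySem.List.sorted xs pvPrice true).getD i []) := by
  have hp := PySem.List.sorted_pairwise_rev xs pvPrice
  rw [List.pairwise_iff_getElem] at hp
  rcases Nat.eq_or_lt_of_le hij with rfl | hij'
  · exact le_refl _
  · have hi : i < (PySem.List.sorted xs pvPrice true).length := lt_trans hij' hj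
    rw [List.getD_eq_getElem _ _ hj, List.getD_eq_getElem _ _ hi]
    exact hp i j hi hj hij'

-- the pick lemma: after skipping, the rest of the presorted chain IS the sorted cheaper list
theorem pv_pick (xs : List (List (String × Int))) (p : Int) (i0 : Nat)
    (h0 : i0 ≤ (PySem.List.sorted xs pvPrice true).length)
    (hpre : ∀ j, j < i0 → p ≤ pvPrice ((PySem.List.sorted xs pvPrice true).getD j [])) :
    (PySem.List.sorted xs pvPrice true).drop (pvSkip (PySem.List.sorted xs pvPrice true) p i0)
        = PySem.List.sorted (xs.filter (fun c => decide (pvPrice c < p))) pvPrice true ∧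
      pvSkip (PySem.List.sorted xs pvPrice true) p i0 ≤ (PySem.List.sorted xs pvPrice true).length := by
  set chain := PySem.List.sorted xs pvPrice true with hchain
  set F := pvSkip chain p i0 with hF
  have hFle : F ≤ chain.length := pvSkip_le_length chain p i0 h0
  have hprefix : ∀ j, j < F → p ≤ pvPrice (chain.getD j []) := by
    intro j hj
    by_cases hji : j < i0
    · exact hpre j hji
    · exact pvSkip_prefix chain p i0 j (by omega) hj
  have hfilter : chain.filter (fun c => decide (pvPrice c < p)) = chain.drop F := by
    conv_lhs => rw [← List.take_append_drop F chain]
    rw [List.filter_append]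
    have h1 : (chain.take F).filter (fun c => decide (pvPrice c < p)) = [] := by
      rw [List.filter_eq_nil_iff]
      intro a ha
      rw [List.mem_take_iff_getElem] at ha
      obtain ⟨j, hj, rfl⟩ := ha
      have hjF : j < F := by omega
      have hjl : j < chain.length := by omega
      have := hprefix j hjF
      rw [List.getD_eq_getElem _ _ hjl] at this
      simp only [decide_eq_true_eq]
      omega
    have h2 : (chain.drop F).filter (fun c => decide (pvPrice c < p)) = chain.drop F := by
      rw [List.filter_eq_self]
      intro a ha
      rw [List.mem_iff_getElem] at ha
      obtain ⟨k, hk, rfl⟩ := ha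
      rw [List.getElem_drop]
      have hFk : F + k < chain.length := by
        have := List.length_drop (l := chain) (i := F)
        omega
      have hFlt : F < chain.length := by omega
      have hstop : pvPrice (chain.getD F []) < p := pvSkip_stop chain p i0 (by omega)
      have hmono : pvPrice (chain.getD (F + k) []) ≤ pvPrice (chain.getD F []) :=
        pv_chain_getD_mono xs F (F + k) (by omega) (by rw [← hchain]; omega)
      rw [List.getD_eq_getElem _ _ hFk, List.getD_eq_getElem _ _ hFlt] at hmono
      rw [List.getD_eq_getElem _ _ hFlt] at hstop
      simp only [decide_eq_true_eq]
      omega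
    rw [h1, h2, List.nil_append]
  refine ⟨?_, hFle⟩
  rw [← hfilter, hchain, pv_sorted_filter_comm]

-- lookups in the literal chains/ptr dicts
theorem pvChains_getD (comps : PySem.Dict String (List (List (String × Int)))) :
    ∀ part ∈ pvOrder, (pvChains comps).getD part [] = PySem.List.sorted (comps.getD part []) pvPrice true := by
  intro part hpart
  fin_cases hpart <;> rfl

theorem pvPtr0_getD : ∀ s : String, pvPtr0.getD s 0 = 0 := by
  intro s
  simp only [pvPtr0, pvOrder, List.map_cons, List.map_nil, PySem.Dict.getD_eq_get?_getD,
    PySem.Dict.get?_mk_cons]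
  split_ifs <;> rfl

-- the pointer invariant carried through B's rounds
def pvInv (chains : PySem.Dict String (List (List (String × Int))))
    (b : PySem.Dict String (List (String × Int))) (ptr : PySem.Dict String Nat) : Prop :=
  ∀ part ∈ pvOrder, ptr.getD part 0 ≤ (chains.getD part []).length ∧
    ∀ item, b.get? part = some item → ∀ j, j < ptr.getD part 0 →
      pvPrice item ≤ pvPrice ((chains.getD part []).getD j [])

-- replacing the (unique-keyed) entry at `part` shifts the total by the price difference
theorem pv_sum_overwrite : ∀ (l : List (String × List (String × Int))) (part : String)
    (cand item : List (String × Int)), (l.map Prod.fst).Nodup → (part, item) ∈ l →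
    ((l.map (fun p => if p.1 == part then (part, cand) else p)).map (fun kv => pvPrice kv.2)).sum
      = (l.map (fun kv => pvPrice kv.2)).sum + pvPrice cand - pvPrice item := by
  intro l part cand item hnd hmem
  induction l with
  | nil => simp at hmem
  | cons a t ih =>
    simp only [List.map_cons, List.nodup_cons] at hnd
    rcases List.mem_cons.1 hmem with rfl | hmem
    · simp only [List.map_cons, List.sum_cons, beq_self_eq_true, if_pos]
      have htid : t.map (fun p => if p.1 == part then (part, cand) else p) = t := by
        apply List.map_congr_left ?_ |>.trans (List.map_id t)
        intro p hp
        have hne : p.1 ≠ part := by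
          intro h
          exact hnd.1 (by simpa [← h] using List.mem_map_of_mem (f := Prod.fst) hp)
        simp [hne]
      rw [htid]
      ring
    · have hne : a.1 ≠ part := by
        intro h
        exact hnd.1 (by simpa [h] using List.mem_map_of_mem (f := Prod.fst) hmem)
      simp only [List.map_cons, List.sum_cons, beq_eq_false_iff_ne.2 hne, Bool.false_eq_true,
        if_false]
      rw [ih hnd.2 hmem]
      ring

theorem pv_total_insert (b : PySem.Dict String (List (String × Int))) (part : String)
    (item cand : List (String × Int)) (hnd : b.keys.Nodup) (hget : b.get? part = some item) :
    pvTotal (b.insert part cand) = pvTotal b + pvPrice cand - pvPrice item := by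
  have hcont : b.contains part = true := by
    rw [PySem.Dict.contains_eq_isSome_get?, hget]; rfl
  have hmem : (part, item) ∈ b.items :=
    (PySem.Dict.get?_eq_some_iff_mem_items b part item hnd).1 hget
  unfold pvTotal
  rw [PySem.Dict.items_insert_of_contains _ _ hcont]
  exact pv_sum_overwrite b.items part cand item hnd hmem

-- one round of A equals one round of B (modulo B's extra pointer state), preserving the
-- key list, the "cur = total" fact and the pointer invariant
theorem pv_roundAB (comps chains : PySem.Dict String (List (List (String × Int)))) (target : Int)
    (hch : ∀ part ∈ pvOrder, chains.getD part [] = PySem.List.sorted (comps.getD part []) pvPrice true) :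
    ∀ (parts : List String), (∀ x ∈ parts, x ∈ pvOrder) →
    ∀ (b : PySem.Dict String (List (String × Int))) (cur : Int) (ch : Bool) (ptr : PySem.Dict String Nat),
      b.keys.Nodup → cur = pvTotal b → pvInv chains b ptr →
      (pvRoundA comps target parts b cur ch
          = ((pvRoundB chains target parts b cur ptr ch).1,
             (pvRoundB chains target parts b cur ptr ch).2.1,
             (pvRoundB chains target parts b cur ptr ch).2.2.2)) ∧
      (pvRoundB chains target parts b cur ptr ch).1.keys = b.keys ∧
      (pvRoundB chains target parts b cur ptr ch).2.1 = pvTotal (pvRoundB chains target parts b cur ptr ch).1 ∧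
      pvInv chains (pvRoundB chains target parts b cur ptr ch).1 (pvRoundB chains target parts b cur ptr ch).2.2.1 := by
  intro parts
  induction parts with
  | nil =>
    intro _ b cur ch ptr hnd hcur hinv
    exact ⟨rfl, rfl, by simpa [pvRoundB] using hcur, hinv⟩
  | cons part rest ih =>
    intro hsub b cur ch ptr hnd hcur hinv
    have hrest : ∀ x ∈ rest, x ∈ pvOrder := fun x hx => hsub x (List.mem_cons_of_mem _ hx)
    have hpart : part ∈ pvOrder := hsub part (List.mem_cons_self ..)
    simp only [pvRoundA, pvRoundB]
    cases hb : b.get? part with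
    | none => exact ih hrest b cur ch ptr hnd hcur hinv
    | some item =>
      simp only
      obtain ⟨hple, hpinv⟩ := hinv part hpart
      have hchain := hch part hpart
      have hpre : ∀ j, j < ptr.getD part 0 →
          pvPrice item ≤ pvPrice ((chains.getD part []).getD j []) :=
        fun j hj => hpinv item hb j hj
      obtain ⟨hdrop, hFle⟩ := pv_pick (comps.getD part []) (pvPrice item) (ptr.getD part 0)
        (by rw [← hchain]; exact hple) (by intro j hj; rw [← hchain]; exact hpre j hj)
      rw [← hchain] at hdrop hFle
      set p := pvPrice item with hp
      set chain := chains.getD part [] with hchaindef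
      set F := pvSkip chain p (ptr.getD part 0) with hFdef
      have hprefix : ∀ j, j < F → p ≤ pvPrice (chain.getD j []) := by
        intro j hj
        by_cases hji : j < ptr.getD part 0
        · exact hpre j hji
        · exact pvSkip_prefix chain p (ptr.getD part 0) j (by omega) hj
      -- the invariant after writing the new pointer, while the item at `part` has price ≥ ...
      have hinv_other : ∀ part' ∈ pvOrder, part' ≠ part →
          ∀ (b' : PySem.Dict String (List (String × Int))), b'.get? part' = b.get? part' →
          (ptr.insert part F).getD part' 0 ≤ (chains.getD part' []).length ∧
          ∀ item', b'.get? part' = some item' → ∀ j, j < (ptr.insert part F).getD part' 0 →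
            pvPrice item' ≤ pvPrice ((chains.getD part' []).getD j []) := by
        intro part' hpart' hne b' hb'
        rw [PySem.Dict.getD_insert_of_ne _ _ _ hne]
        obtain ⟨h1, h2⟩ := hinv part' hpart'
        exact ⟨h1, fun item' hi' j hj => h2 item' (hb' ▸ hi') j hj⟩
      by_cases hFlt : F < chain.length
      · -- a cheaper candidate exists: both sides pick the same one
        have hcheaper_ne : (comps.getD part []).filter (fun c => decide (pvPrice c < p)) ≠ [] := by
          intro hc
          rw [hc] at hdrop
          simp only [PySem.List.sorted, List.foldl_nil] at hdrop
          have := List.length_drop (l := chain) (i := F)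
          rw [hdrop] at this
          simp at this
          omega
        rw [if_neg hcheaper_ne, dif_pos hFlt]
        have hdropcons : chain.drop F = chain[F] :: chain.drop (F + 1) :=
          List.drop_eq_getElem_cons hFlt
        have hcand : (PySem.List.sorted ((comps.getD part []).filter (fun c => decide (pvPrice c < p))) pvPrice true).headI = chain[F] := by
          rw [← hdrop, hdropcons]; rfl
        rw [hcand]
        have hcont : b.contains part = true := by
          rw [PySem.Dict.contains_eq_isSome_get?, hb]; rfl
        have hkeys : (b.insert part chain[F]).keys = b.keys :=
          PySem.Dict.keys_insert_of_contains _ _ hcont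
        have htot : pvTotal (b.insert part chain[F]) = pvTotal b + pvPrice chain[F] - p :=
          pv_total_insert b part item chain[F] hnd hb
        have hcur' : pvTotal (b.insert part chain[F]) = cur + pvPrice chain[F] - p := by
          rw [htot, hcur]
        rw [hcur']
        have hstop : pvPrice (chain.getD F []) < p := pvSkip_stop chain p (ptr.getD part 0) hFlt
        -- the invariant for the new build/pointer state
        have hinv' : pvInv chains (b.insert part chain[F]) (ptr.insert part F) := by
          intro part' hpart'
          by_cases hne : part' = part
          · subst hne
            rw [PySem.Dict.getD_insert_self, PySem.Dict.get?_insert_self]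
            refine ⟨le_of_lt hFlt, ?_⟩
            intro item' hi' j hj
            injection hi' with hitem
            subst hitem
            have hjp := hprefix j hj
            have hstop' := hstop
            rw [List.getD_eq_getElem _ _ hFlt] at hstop'
            rw [← hchaindef]
            omega
          · obtain ⟨h1, h2⟩ := hinv_other part' hpart' hne (b.insert part chain[F])
              (PySem.Dict.get?_insert_of_ne _ _ hne)
            exact ⟨h1, h2⟩
        by_cases hle : cur + pvPrice chain[F] - p ≤ target
        · rw [if_pos hle, if_pos hle]
          exact ⟨rfl, hkeys, hcur'.symm, hinv'⟩
        · rw [if_neg hle, if_neg hle]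
          obtain ⟨heq, hk, hc2, hi2⟩ := ih hrest (b.insert part chain[F]) (cur + pvPrice chain[F] - p)
            true (ptr.insert part F) (by rwa [hkeys]) hcur'.symm hinv'
          exact ⟨heq, hk.trans hkeys, hc2, hi2⟩
      · -- no cheaper candidate: A skips, B records the exhausted pointer
        have hFeq : F = chain.length := by omega
        have hcheaper : (comps.getD part []).filter (fun c => decide (pvPrice c < p)) = [] := by
          have hnil : chain.drop F = [] := List.drop_eq_nil_of_le (by omega)
          rw [hnil] at hdrop
          rwa [Eq.comm, PySem.List.sorted_eq_nil_iff] at hdrop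
        rw [if_pos hcheaper, dif_neg hFlt]
        have hinv' : pvInv chains b (ptr.insert part F) := by
          intro part' hpart'
          by_cases hne : part' = part
          · subst hne
            rw [PySem.Dict.getD_insert_self]
            refine ⟨by omega, ?_⟩
            intro item' hi' j hj
            rw [hb] at hi'
            injection hi' with hitem
            subst hitem
            rw [← hchaindef]
            exact hprefix j hj
          · exact hinv_other part' hpart' hne b rfl
        exact ih hrest b cur ch (ptr.insert part F) hnd hcur hinv'

-- a finished (cur ≤ target) B-loop returns immediately, whatever fuel remains
theorem pvLoopB_stop (chains : PySem.Dict String (List (List (String × Int)))) (target : Int)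
    (b : PySem.Dict String (List (String × Int))) (cur : Int) (ptr : PySem.Dict String Nat)
    (h : cur ≤ target) : ∀ fuel, pvLoopB chains target fuel b cur ptr = (b, cur) := by
  intro fuel
  cases fuel with
  | zero => rfl
  | succ f => simp only [pvLoopB, if_pos h]

theorem pv_loopAB (comps chains : PySem.Dict String (List (List (String × Int)))) (target : Int)
    (hch : ∀ part ∈ pvOrder, chains.getD part [] = PySem.List.sorted (comps.getD part []) pvPrice true) :
    ∀ (fA : Nat), ∀ (fB : Nat) (b : PySem.Dict String (List (String × Int))) (cur : Int) (ptr : PySem.Dict String Nat),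
      pvMeasure comps b < fA → pvMeasure chains b < fB →
      b.keys.Nodup → cur = pvTotal b → pvInv chains b ptr → target < cur →
      pvLoopA comps target fA b cur = pvLoopB chains target fB b cur ptr := by
  intro fA
  induction fA with
  | zero => intro fB b cur ptr h; omega
  | succ fA ihn =>
    intro fB b cur ptr hltA hltB hnd hcur hinv hgt
    cases fB with
    | zero => omega
    | succ fB =>
      simp only [pvLoopA, pvLoopB]
      rw [if_neg (not_le.mpr hgt)]
      obtain ⟨heq, hkeys, htot, hinv'⟩ := pv_roundAB comps chains target hch pvOrder
        (fun x hx => hx) b cur false ptr hnd hcur hinv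
      rw [heq]
      obtain ⟨hleA, hstrictA⟩ := pv_roundA_measure comps target pvOrder (fun x hx => hx) b cur false
      rw [heq] at hleA hstrictA
      obtain ⟨hleB, hstrictB⟩ := pv_roundB_measure chains target pvOrder (fun x hx => hx) b cur ptr false
      simp only at hleA hstrictA hleB hstrictB ⊢
      set rB := pvRoundB chains target pvOrder b cur ptr false with hrB
      by_cases h2 : rB.2.2.2 = true
      · have hmuA : pvMeasure comps rB.1 < fA := by
          rcases hstrictA h2 with hc | hc
          · exact absurd hc (by simp)
          · omega
        have hmuB : pvMeasure chains rB.1 < fB := by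
          rcases hstrictB h2 with hc | hc
          · exact absurd hc (by simp)
          · omega
        by_cases h3 : target < rB.2.1
        · rw [if_pos ⟨h2, h3⟩, if_pos h2]
          exact ihn fB rB.1 rB.2.1 rB.2.2.1 hmuA hmuB (by rwa [hkeys]) htot hinv' h3
        · rw [if_neg (fun hc => h3 hc.2), if_pos h2]
          rw [pvLoopB_stop chains target rB.1 rB.2.1 rB.2.2.1 (not_lt.1 h3) fB]
      · rw [if_neg (fun hc => h2 hc.1), if_neg h2]

-- ===== VERDICT (by name: the statement is the Claim_ definition above) =====
theorem degrade_to_budget_spec : Claim_equal_degrade_to_budget := by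
  intro build components target_budget _hdom hpre
  unfold Spec_degrade_to_budget
  simp only [degrade_to_budget, degrade_to_budget_alt]
  have hnd : (PySem.Dict.mk build).keys.Nodup := hpre.1
  by_cases h : pvTotal (PySem.Dict.mk build) ≤ target_budget
  · rw [if_pos h, if_pos h]
  · rw [if_neg h, if_neg h]
    have hinv0 : pvInv (pvChains (PySem.Dict.mk components)) (PySem.Dict.mk build) pvPtr0 := by
      intro part hpart
      rw [pvPtr0_getD]
      exact ⟨Nat.zero_le _, fun item _ j hj => absurd hj (Nat.not_lt_zero j)⟩
    rw [pv_loopAB (PySem.Dict.mk components) (pvChains (PySem.Dict.mk components)) target_budget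
      (pvChains_getD (PySem.Dict.mk components))
      (pvMeasure (PySem.Dict.mk components) (PySem.Dict.mk build) + 1)
      (pvMeasure (pvChains (PySem.Dict.mk components)) (PySem.Dict.mk build) + 1)
      (PySem.Dict.mk build) (pvTotal (PySem.Dict.mk build)) pvPtr0
      (Nat.lt_succ_self _) (Nat.lt_succ_self _) hnd rfl hinv0 (lt_of_not_ge h)]
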